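-- pv_equiv track=rewrite | github.com/dreambocn/StockProject | backend/app/services/web_source_metadata_service.py | _resolve_source_from_domain
-- ===== SOURCE A (Python) =====
-- DOMAIN_SOURCE_MAP: dict[str, str] = {
--     "reuters.com": "Reuters",
--     "finance.eastmoney.com": "东方财富",
--     "eastmoney.com": "东方财富",
--     "cls.cn": "财联社",
--     "stcn.com": "证券时报",
--     "cninfo.com.cn": "巨潮资讯",
-- }
--
-- def _resolve_source_from_domain(domain: str | None) -> str | None:
--     if not domain:
--         return None
--     if domain in DOMAIN_SOURCE_MAP:
--         return DOMAIN_SOURCE_MAP[domain]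
--     for known_domain, source in DOMAIN_SOURCE_MAP.items():
--         if domain.endswith(f".{known_domain}"):
--             return source
--     return domain
-- ===== SOURCE B (Python) =====
-- DOMAIN_SOURCE_MAP: dict[str, str] = {
--     "reuters.com": "Reuters",
--     "finance.eastmoney.com": "东方财富",
--     "eastmoney.com": "东方财富",
--     "cls.cn": "财联社",
--     "stcn.com": "证券时报",
--     "cninfo.com.cn": "巨潮资讯",
-- }
--
-- def _resolve_source_from_domain(domain: str | None) -> str | None:
--     if not domain:
--         return None
--     parts = domain.split(".")
--     for i in range(len(parts)):
--         candidate = ".".join(parts[i:])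
--         if candidate in DOMAIN_SOURCE_MAP:
--             return DOMAIN_SOURCE_MAP[candidate]
--     return domain
-- ===== Notes on version B (the rewrite author's own statement) =====
-- stated objective: idiomatic
-- what changed: Instead of testing the domain against each map entry with endswith, B generates the domain's progressive dot-suffixes (most specific first, starting with the full domain, which subsumes the exact-match branch) and returns the map value of the first suffix that is a key, falling back to the domain itself.
import Mathlib
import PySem

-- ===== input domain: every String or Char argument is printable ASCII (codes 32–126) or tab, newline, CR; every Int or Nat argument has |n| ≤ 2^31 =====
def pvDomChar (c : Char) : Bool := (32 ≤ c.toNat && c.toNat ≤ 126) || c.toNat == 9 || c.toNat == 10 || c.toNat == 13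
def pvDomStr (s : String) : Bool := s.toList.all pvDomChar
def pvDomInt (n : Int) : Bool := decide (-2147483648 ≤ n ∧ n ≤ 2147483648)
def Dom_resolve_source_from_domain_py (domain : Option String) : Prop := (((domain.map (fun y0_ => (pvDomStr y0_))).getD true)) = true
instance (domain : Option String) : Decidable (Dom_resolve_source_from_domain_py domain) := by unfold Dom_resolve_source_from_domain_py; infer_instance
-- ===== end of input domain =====

-- B replaces A's endswith scan over the map entries by generating the domain's
-- progressive dot-suffixes (most specific first) and looking each up in the map
-- (objective: idiomatic; same return value, no side effects).

-- ===== PORT A =====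
-- module-level constant DOMAIN_SOURCE_MAP (shared context of both programs)
def pvEntries : List (String × String) :=
  [("reuters.com", "Reuters"),
   ("finance.eastmoney.com", "东方财富"),
   ("eastmoney.com", "东方财富"),
   ("cls.cn", "财联社"),
   ("stcn.com", "证券时报"),
   ("cninfo.com.cn", "巨潮资讯")]

def DOMAIN_SOURCE_MAP : PySem.Dict String String := PySem.Dict.ofList pvEntries

-- the 'for known_domain, source in DOMAIN_SOURCE_MAP.items():' loop of A
def pvSuffixLoopA (d : String) : List (String × String) → Option String
  | [] => none
  | (k, v) :: rest =>
    if PySem.Str.endswith d ("." ++ k) then some v else pvSuffixLoopA d rest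

def resolve_source_from_domain_py (domain : Option String) : Option String :=
  match domain with
  | none => none
  | some d =>
    if d = "" then none
    else
      match DOMAIN_SOURCE_MAP.get? d with
      | some v => some v
      | none =>
        match pvSuffixLoopA d DOMAIN_SOURCE_MAP.items with
        | some v => some v
        | none => some d

-- ===== PORT B =====
-- the 'for i in range(len(parts)): candidate = ".".join(parts[i:])' loop of B:
-- iterating i over range(len(parts)) visits exactly the nonempty tails of parts
def pvCandLoopB : List String → Option String
  | [] => none
  | ps@(_ :: rest) =>
    match DOMAIN_SOURCE_MAP.get? (PySem.Str.join "." ps) with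
    | some v => some v
    | none => pvCandLoopB rest

def resolve_source_from_domain_py_alt (domain : Option String) : Option String :=
  match domain with
  | none => none
  | some d =>
    if d = "" then none
    else
      match pvCandLoopB ((PySem.Str.split? d ".").getD []) with
      | some v => some v
      | none => some d

-- ===== PRECONDITION & SPEC =====
def Spec_resolve_source_from_domain_py (domain : Option String) (out : Option String) : Prop := out = resolve_source_from_domain_py_alt domain
instance (domain : Option String) (out : Option String) : Decidable (Spec_resolve_source_from_domain_py domain out) := by unfold Spec_resolve_source_from_domain_py; infer_instance

-- ===== CLAIM (what is proved, stated in full; the proofs are below) =====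
def Claim_equal_resolve_source_from_domain_py : Prop := ∀ (domain : Option String), Dom_resolve_source_from_domain_py domain → Spec_resolve_source_from_domain_py domain (resolve_source_from_domain_py domain)

-- ===== LEMMAS AND PROOFS =====

-- simple recursive version of Python's split(".") used only inside proofs
def pvSp : List Char → List (List Char)
  | [] => [[]]
  | c :: rest =>
    if c = '.' then [] :: pvSp rest
    else
      match pvSp rest with
      | [] => [[c]]
      | h :: t => (c :: h) :: t

lemma pvSp_ne_nil (cs : List Char) : pvSp cs ≠ [] := by
  cases cs with
  | nil => simp [pvSp]
  | cons c rest =>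
    simp only [pvSp]
    split_ifs
    · simp
    · cases h : pvSp rest <;> simp

lemma pvGo_eq (fuel : Nat) (l cur : List Char) (acc : List (List Char)) (h : l.length < fuel) :
    PySem.Chars.splitOn.go ['.'] fuel l cur acc
      = acc.reverse ++ (pvSp l).modifyHead (cur.reverse ++ ·) := by
  induction fuel generalizing l cur acc with
  | zero => omega
  | succ n ih =>
    cases l with
    | nil => simp [PySem.Chars.splitOn.go, pvSp]
    | cons c rest =>
      by_cases hc : c = '.'
      · subst hc
        rw [PySem.Chars.splitOn.go]
        have hp : List.isPrefixOf ['.'] ('.' :: rest) = true := by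
          simp [List.isPrefixOf]
        rw [if_pos hp]
        have hlen : rest.length < n := by simp at h; omega
        rw [show List.drop (List.length ['.']) ('.' :: rest) = rest by simp]
        rw [ih rest [] (List.reverse cur :: acc) hlen]
        simp only [pvSp, ↓reduceIte]
        cases hsp : pvSp rest with
        | nil => exact absurd hsp (pvSp_ne_nil rest)
        | cons a t => simp
      · rw [PySem.Chars.splitOn.go]
        have hp : List.isPrefixOf ['.'] (c :: rest) = false := by
          simp [List.isPrefixOf]; exact fun hh => absurd hh.symm hc
        rw [if_neg (by simp [hp])]
        have hlen : rest.length < n := by simp at h; omega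
        rw [ih rest (c :: cur) acc hlen]
        simp only [pvSp, if_neg hc]
        cases hsp : pvSp rest with
        | nil => exact absurd hsp (pvSp_ne_nil rest)
        | cons a t => simp

lemma pvSplitOn_eq_sp (cs : List Char) : PySem.Chars.splitOn cs ['.'] = pvSp cs := by
  rw [PySem.Chars.splitOn, pvGo_eq cs.length.succ cs [] [] (by omega)]
  cases hsp : pvSp cs with
  | nil => exact absurd hsp (pvSp_ne_nil cs)
  | cons a t => simp

lemma pvJn_cons (a : List Char) (l : List (List Char)) (h : l ≠ []) :
    PySem.Chars.join ['.'] (a :: l) = a ++ '.' :: PySem.Chars.join ['.'] l := by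
  cases l with
  | nil => simp at h
  | cons b t =>
    simp [PySem.Chars.join, List.intercalate, List.intersperse_cons₂]

lemma pvJn_sp (cs : List Char) : PySem.Chars.join ['.'] (pvSp cs) = cs := by
  induction cs with
  | nil => simp [pvSp, PySem.Chars.join, List.intercalate]
  | cons c rest ih =>
    by_cases hc : c = '.'
    · subst hc
      simp only [pvSp, ↓reduceIte]
      rw [pvJn_cons _ _ (pvSp_ne_nil rest), ih]
      simp
    · simp only [pvSp, if_neg hc]
      cases hsp : pvSp rest with
      | nil => exact absurd hsp (pvSp_ne_nil rest)
      | cons a t =>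
        rw [hsp] at ih
        cases t with
        | nil =>
          simp [PySem.Chars.join, List.intercalate, List.intersperse] at ih ⊢
          simp [ih]
        | cons b t' =>
          rw [pvJn_cons _ _ (by simp)] at ih ⊢
          simp only [List.cons_append, List.cons.injEq] at ih ⊢
          exact ⟨trivial, ih⟩

lemma pvSp_append (p q : List Char) : pvSp (p ++ '.' :: q) = pvSp p ++ pvSp q := by
  induction p with
  | nil => simp [pvSp]
  | cons c p' ih =>
    by_cases hc : c = '.'
    · subst hc
      simp only [List.cons_append, pvSp, ↓reduceIte, ih]
    · simp only [List.cons_append, pvSp, if_neg hc, ih]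
      cases hsp : pvSp p' with
      | nil => exact absurd hsp (pvSp_ne_nil p')
      | cons a t => simp

lemma pvTail_suffix (cs : List Char) (t : List (List Char))
    (hs : t <:+ pvSp cs) (hne : t ≠ pvSp cs) (hn : t ≠ []) :
    '.' :: PySem.Chars.join ['.'] t <:+ cs := by
  induction cs generalizing t with
  | nil =>
    simp [pvSp] at hs
    rcases List.suffix_cons_iff.mp hs with h | h
    · exact absurd h (by simpa [pvSp] using hne)
    · simp at h; exact absurd h hn
  | cons c rest ih =>
    by_cases hc : c = '.'
    · subst hc
      simp only [pvSp, ↓reduceIte] at hs hne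
      rcases List.suffix_cons_iff.mp hs with h | h
      · exact absurd h hne
      · by_cases ht : t = pvSp rest
        · subst ht
          rw [pvJn_sp]
        · exact (ih t h ht hn).trans (List.suffix_cons _ _)
    · simp only [pvSp, if_neg hc] at hs hne
      cases hsp : pvSp rest with
      | nil => exact absurd hsp (pvSp_ne_nil rest)
      | cons a tl =>
        rw [hsp] at hs hne
        rcases List.suffix_cons_iff.mp hs with h | h
        · exact absurd h hne
        · have ht : t ≠ pvSp rest := by
            intro hh
            rw [hh, hsp] at h
            have := List.IsSuffix.length_le h
            simp at this
          have hstep : t <:+ pvSp rest := by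
            rw [hsp]; exact h.trans (List.suffix_cons _ _)
          exact (ih t hstep ht hn).trans (List.suffix_cons _ _)

-- "domain matches key k" (exactly or as a dot-suffix)
def pvMatched (cs : List Char) (k : String) : Prop :=
  cs = k.toList ∨ ('.' :: k.toList) <:+ cs

lemma pvNot_both (cs : List Char) (k k' : String)
    (h1 : k.toList ≠ k'.toList)
    (h2 : ¬ ('.' :: k'.toList <:+ k.toList))
    (h3 : ¬ ('.' :: k.toList <:+ k'.toList))
    (h4 : ¬ ('.' :: k.toList <:+ '.' :: k'.toList))
    (h5 : ¬ ('.' :: k'.toList <:+ '.' :: k.toList))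
    (hm : pvMatched cs k) (hm' : pvMatched cs k') : False := by
  rcases hm with hq | he <;> rcases hm' with hq' | he'
  · exact h1 (hq ▸ hq')
  · exact h2 (hq ▸ he')
  · exact h3 (hq' ▸ he)
  · rcases List.suffix_or_suffix_of_suffix he he' with h | h
    · exact h4 h
    · exact h5 h

-- any two matched entries carry the same source name (the only nested pair of
-- keys, finance.eastmoney.com / eastmoney.com, shares its value)
set_option maxHeartbeats 1000000 in
lemma pvCoherence (cs : List Char) (k v k' v' : String)
    (hk : (k, v) ∈ pvEntries) (hk' : (k', v') ∈ pvEntries)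
    (hm : pvMatched cs k) (hm' : pvMatched cs k') : v = v' := by
  fin_cases hk <;> fin_cases hk' <;>
    first
      | rfl
      | exact absurd (pvNot_both cs _ _ (by decide) (by decide) (by decide) (by decide) (by decide) hm hm') (by simp)

-- dict lookup characterisations
lemma pvMap_mk : DOMAIN_SOURCE_MAP = ⟨pvEntries⟩ := by decide

lemma pvItems : DOMAIN_SOURCE_MAP.items = pvEntries := by decide

lemma pvGet?_mem (s v : String) (h : DOMAIN_SOURCE_MAP.get? s = some v) : (s, v) ∈ pvEntries := by
  rw [pvMap_mk] at h
  simp only [pvEntries, PySem.Dict.get?_mk_cons] at h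
  split_ifs at h with h1 h2 h3 h4 h5 h6
  all_goals first
    | (simp only [Option.some.injEq] at h
       first
        | (rw [beq_iff_eq] at h1; simp [pvEntries, ← h1, ← h])
        | (rw [beq_iff_eq] at h2; simp [pvEntries, ← h2, ← h])
        | (rw [beq_iff_eq] at h3; simp [pvEntries, ← h3, ← h])
        | (rw [beq_iff_eq] at h4; simp [pvEntries, ← h4, ← h])
        | (rw [beq_iff_eq] at h5; simp [pvEntries, ← h5, ← h])
        | (rw [beq_iff_eq] at h6; simp [pvEntries, ← h6, ← h]))
    | simp [PySem.Dict.get?] at h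

lemma pvGet?_of_mem (k v : String) (h : (k, v) ∈ pvEntries) : DOMAIN_SOURCE_MAP.get? k = some v := by
  fin_cases h <;> decide

-- cores: the result of each program before the final 'return domain' fallback
def pvCoreA (d : String) : Option String :=
  match DOMAIN_SOURCE_MAP.get? d with
  | some v => some v
  | none => pvSuffixLoopA d DOMAIN_SOURCE_MAP.items

def pvCoreB (d : String) : Option String :=
  pvCandLoopB ((PySem.Str.split? d ".").getD [])

lemma pvParts_map (d : String) :
    ((PySem.Str.split? d ".").getD []).map String.toList = pvSp d.toList := by
  have h := PySem.Str.split?_map d "."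
  have hsep : (".".toList) = ['.'] := by decide
  rw [hsep] at h
  have h2 : PySem.Chars.split? d.toList ['.'] = some (pvSp d.toList) := by
    rw [PySem.Chars.split?]
    simp [pvSplitOn_eq_sp]
  rw [h2] at h
  cases hs : PySem.Str.split? d "." with
  | none => rw [hs] at h; simp at h
  | some ps =>
    rw [hs] at h
    simp only [Option.map_some, Option.some.injEq] at h
    simpa using h

lemma pvEndswith_iff (d k : String) :
    PySem.Str.endswith d ("." ++ k) = true ↔ ('.' :: k.toList) <:+ d.toList := by
  rw [PySem.Str.endswith_eq, PySem.Chars.endswith_iff]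
  have : ("." ++ k).toList = '.' :: k.toList := by simp
  rw [this]

-- A side
lemma pvLoopA_sound (d : String) (l : List (String × String)) (v : String)
    (h : pvSuffixLoopA d l = some v) :
    ∃ p ∈ l, PySem.Str.endswith d ("." ++ p.1) = true ∧ v = p.2 := by
  induction l with
  | nil => simp [pvSuffixLoopA] at h
  | cons p rest ih =>
    obtain ⟨k, w⟩ := p
    by_cases he : PySem.Str.endswith d ("." ++ k) = true
    · rw [pvSuffixLoopA, if_pos he] at h
      exact ⟨(k, w), List.mem_cons_self, he, (Option.some.injEq _ _).mp h.symm⟩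
    · rw [pvSuffixLoopA, if_neg he] at h
      obtain ⟨q, hq, hqe, hqv⟩ := ih h
      exact ⟨q, List.mem_cons_of_mem _ hq, hqe, hqv⟩

lemma pvLoopA_complete (d : String) (l : List (String × String))
    (h : ∃ p ∈ l, PySem.Str.endswith d ("." ++ p.1) = true) :
    pvSuffixLoopA d l ≠ none := by
  induction l with
  | nil => simp at h
  | cons p rest ih =>
    obtain ⟨k, w⟩ := p
    by_cases he : PySem.Str.endswith d ("." ++ k) = true
    · rw [pvSuffixLoopA, if_pos he]; simp
    · rw [pvSuffixLoopA, if_neg he]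
      obtain ⟨q, hq, hqe⟩ := h
      rcases List.mem_cons.mp hq with h1 | h1
      · rw [h1] at hqe; exact absurd hqe he
      · exact ih ⟨q, h1, hqe⟩

lemma pvSoundA (d v : String) (h : pvCoreA d = some v) :
    ∃ p ∈ pvEntries, pvMatched d.toList p.1 ∧ v = p.2 := by
  unfold pvCoreA at h
  cases hg : DOMAIN_SOURCE_MAP.get? d with
  | some w =>
    rw [hg] at h
    have hv := (Option.some.injEq _ _).mp h
    exact ⟨(d, w), pvGet?_mem d w hg, Or.inl rfl, hv.symm⟩
  | none =>
    rw [hg, pvItems] at h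
    obtain ⟨p, hp, hpe, hpv⟩ := pvLoopA_sound d pvEntries v h
    exact ⟨p, hp, Or.inr ((pvEndswith_iff d p.1).mp hpe), hpv⟩

lemma pvCompleteA (d k v : String) (hk : (k, v) ∈ pvEntries) (hm : pvMatched d.toList k) :
    pvCoreA d ≠ none := by
  unfold pvCoreA
  cases hg : DOMAIN_SOURCE_MAP.get? d with
  | some w => simp
  | none =>
    rcases hm with hq | he
    · have hd : d = k := String.toList_inj.mp hq
      rw [hd, pvGet?_of_mem k v hk] at hg
      cases hg
    · rw [pvItems]
      exact pvLoopA_complete d pvEntries ⟨(k, v), hk, (pvEndswith_iff d k).mpr he⟩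

-- B side
lemma pvLoopB_sound (ps : List String) (v : String) (h : pvCandLoopB ps = some v) :
    ∃ t, t <:+ ps ∧ t ≠ [] ∧ DOMAIN_SOURCE_MAP.get? (PySem.Str.join "." t) = some v := by
  induction ps with
  | nil => simp [pvCandLoopB] at h
  | cons a rest ih =>
    rw [pvCandLoopB] at h
    cases hg : DOMAIN_SOURCE_MAP.get? (PySem.Str.join "." (a :: rest)) with
    | some w =>
      rw [hg] at h
      have hv := (Option.some.injEq _ _).mp h
      exact ⟨a :: rest, List.suffix_refl _, by simp, hv ▸ hg⟩
    | none =>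
      rw [hg] at h
      obtain ⟨t, hts, htn, htg⟩ := ih h
      exact ⟨t, hts.trans (List.suffix_cons _ _), htn, htg⟩

lemma pvLoopB_complete (ps : List String)
    (h : ∃ t, t <:+ ps ∧ t ≠ [] ∧ (DOMAIN_SOURCE_MAP.get? (PySem.Str.join "." t)).isSome) :
    pvCandLoopB ps ≠ none := by
  induction ps with
  | nil =>
    obtain ⟨t, hts, htn, _⟩ := h
    exact absurd (List.suffix_nil.mp hts) htn
  | cons a rest ih =>
    rw [pvCandLoopB]
    cases hg : DOMAIN_SOURCE_MAP.get? (PySem.Str.join "." (a :: rest)) with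
    | some w => simp
    | none =>
      obtain ⟨t, hts, htn, htg⟩ := h
      rcases List.suffix_cons_iff.mp hts with h1 | h1
      · rw [h1, hg] at htg; simp at htg
      · exact ih ⟨t, h1, htn, htg⟩

lemma pvJoin_toList (t : List String) :
    (PySem.Str.join "." t).toList = PySem.Chars.join ['.'] (t.map String.toList) := by
  rw [PySem.Str.toList_join]
  have : (".".toList) = ['.'] := by decide
  rw [this]

lemma pvSoundB (d v : String) (h : pvCoreB d = some v) :
    ∃ p ∈ pvEntries, pvMatched d.toList p.1 ∧ v = p.2 := by
  unfold pvCoreB at h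
  obtain ⟨t, hts, htne, hget⟩ := pvLoopB_sound _ _ h
  refine ⟨(PySem.Str.join "." t, v), pvGet?_mem _ _ hget, ?_, rfl⟩
  have hmap := pvParts_map d
  have hsuf : t.map String.toList <:+ pvSp d.toList := hmap ▸ hts.map _
  have hjt := pvJoin_toList t
  by_cases hfull : t.map String.toList = pvSp d.toList
  · left
    rw [hjt, hfull, pvJn_sp]
  · right
    rw [hjt]
    exact pvTail_suffix _ _ hsuf hfull (by simpa using htne)

lemma pvCompleteB (d k v : String) (hk : (k, v) ∈ pvEntries) (hm : pvMatched d.toList k) :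
    pvCoreB d ≠ none := by
  unfold pvCoreB
  apply pvLoopB_complete
  rcases hm with hq | he
  · refine ⟨(PySem.Str.split? d ".").getD [], List.suffix_refl _, ?_, ?_⟩
    · intro h0
      have := pvParts_map d
      rw [h0] at this
      exact pvSp_ne_nil _ (by simpa using this.symm)
    · have hjd : (PySem.Str.join "." ((PySem.Str.split? d ".").getD [])).toList = k.toList := by
        rw [pvJoin_toList, pvParts_map, pvJn_sp, hq]
      rw [String.toList_inj.mp hjd, pvGet?_of_mem k v hk]
      rfl
  · obtain ⟨p, hp⟩ := he
    have hsp : pvSp d.toList = pvSp p ++ pvSp k.toList := by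
      rw [← hp, pvSp_append]
    have hmap := pvParts_map d
    rw [hsp] at hmap
    obtain ⟨t1, t2, hparts, h1, h2⟩ := List.map_eq_append_iff.mp hmap
    refine ⟨t2, ⟨t1, hparts.symm⟩, ?_, ?_⟩
    · intro h0
      rw [h0] at h2
      exact pvSp_ne_nil _ (by simpa using h2.symm)
    · have hjk : (PySem.Str.join "." t2).toList = k.toList := by
        rw [pvJoin_toList, h2, pvJn_sp]
      rw [String.toList_inj.mp hjk, pvGet?_of_mem k v hk]
      rfl

-- fold each port into its core
lemma pvPortA (d : String) (hd : ¬ d = "") :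
    resolve_source_from_domain_py (some d)
      = match pvCoreA d with | some v => some v | none => some d := by
  simp only [resolve_source_from_domain_py, if_neg hd, pvCoreA]
  cases DOMAIN_SOURCE_MAP.get? d with
  | some v => rfl
  | none => cases pvSuffixLoopA d DOMAIN_SOURCE_MAP.items <;> rfl

lemma pvPortB (d : String) (hd : ¬ d = "") :
    resolve_source_from_domain_py_alt (some d)
      = match pvCoreB d with | some v => some v | none => some d := by
  simp only [resolve_source_from_domain_py_alt, if_neg hd, pvCoreB]

lemma pvMain (d : String) (hd : ¬ d = "") :
    resolve_source_from_domain_py (some d) = resolve_source_from_domain_py_alt (some d) := by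
  rw [pvPortA d hd, pvPortB d hd]
  cases hA : pvCoreA d with
  | none =>
    cases hB : pvCoreB d with
    | none => rfl
    | some w =>
      obtain ⟨p, hp, hmp, _⟩ := pvSoundB d w hB
      exact absurd hA (pvCompleteA d p.1 p.2 (by simpa using hp) hmp)
  | some v =>
    obtain ⟨p, hp, hmp, hv⟩ := pvSoundA d v hA
    cases hB : pvCoreB d with
    | none => exact absurd hB (pvCompleteB d p.1 p.2 (by simpa using hp) hmp)
    | some w =>
      obtain ⟨q, hq, hmq, hw⟩ := pvSoundB d w hB
      have hvv := pvCoherence d.toList p.1 p.2 q.1 q.2 (by simpa using hp) (by simpa using hq) hmp hmq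
      simp [hv, hw, hvv]

-- ===== VERDICT (by name: the statement is the Claim_ definition above) =====
theorem resolve_source_from_domain_py_spec : Claim_equal_resolve_source_from_domain_py := by
  intro domain _
  unfold Spec_resolve_source_from_domain_py
  match domain with
  | none => rfl
  | some d =>
    by_cases hd : d = ""
    · subst hd; rfl
    · exact pvMain d hd
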